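-- pv_equiv track=rewrite | github.com/msimmara/NoSpeulers | Euler/Euler.py | removeWithRepeating
-- ===== SOURCE A (Python) =====
-- def removeWithRepeating(numList):
--     result = list()
--     for i in numList:
--         temp = [False for i in range(0,11)]
--         tempNumStr = str(i)
--         add = True
--         for dig in tempNumStr:
--             if(temp[int(dig)]):
--                 add = False
--                 break
--             temp[int(dig)] = True
--         if(add): result.append(i)
--     return result
-- ===== SOURCE B (Python) =====
-- def removeWithRepeating(numList):
--     result = []
--     for i in numList:
--         s = sorted(str(i))
--         if all(a != b for a, b in zip(s, s[1:])):
--             result.append(i)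
--     return result
-- ===== Notes on version B (the rewrite author's own statement) =====
-- stated objective: alternative
-- what changed: Replaces A's per-number 11-slot boolean seen-array with early-break flag by sorting each number's digit characters and scanning adjacent pairs for a duplicate (sort-then-scan instead of a seen table).
import Mathlib
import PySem

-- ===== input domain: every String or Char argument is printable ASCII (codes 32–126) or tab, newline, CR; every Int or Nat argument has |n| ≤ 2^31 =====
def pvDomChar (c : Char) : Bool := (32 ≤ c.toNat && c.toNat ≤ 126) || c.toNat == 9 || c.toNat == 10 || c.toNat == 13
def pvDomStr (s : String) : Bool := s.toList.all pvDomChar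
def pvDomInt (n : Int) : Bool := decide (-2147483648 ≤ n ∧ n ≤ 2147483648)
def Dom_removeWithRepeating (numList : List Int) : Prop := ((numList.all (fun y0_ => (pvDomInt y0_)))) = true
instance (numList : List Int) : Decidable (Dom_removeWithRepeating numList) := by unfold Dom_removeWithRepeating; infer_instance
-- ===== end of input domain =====

-- B sorts each number's digit characters and keeps the number when no two adjacent sorted
-- characters are equal (sort-then-adjacent-scan), instead of A's 11-slot seen-array with
-- early break (alternative algorithm of similar cost).


-- ===== PORT A =====
-- int(dig) for one digit char '0'..'9' equals its code minus 48; exact on Pre_ (Python raises ValueError on any other char, which only occurs for negative numbers, excluded by Pre_).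
def pvDigit (c : Char) : Int := (c.toNat : Int) - 48

-- the inner 'for dig in tempNumStr' loop: temp is the boolean array, returns the final 'add' flag
def pvAInner : List Char → List Bool → Bool
  | [], _ => true
  | c :: cs, temp =>
    if PySem.List.pyGetD temp (pvDigit c) false then false
    else pvAInner cs (PySem.List.pySetD temp (pvDigit c) true)

def removeWithRepeating (numList : List Int) : List Int :=
  numList.foldl (fun result i =>
    let temp := (PySem.List.pyRange 0 11 1).map (fun _ => false)
    if pvAInner (PySem.Int.toChars i) temp then result ++ [i] else result) []

-- ===== PORT B =====
-- s = sorted(str(i)); all(a != b for a, b in zip(s, s[1:]))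
def pvBTest (i : Int) : Bool :=
  let s := PySem.List.sorted (PySem.Int.toChars i) (fun c => c) false
  (s.zip (PySem.List.slice s (some 1) none)).all (fun p => p.1 != p.2)

def removeWithRepeating_alt (numList : List Int) : List Int :=
  numList.foldl (fun result i => if pvBTest i then result ++ [i] else result) []

-- ===== PRECONDITION & SPEC =====
-- Pre_: all elements nonnegative — on a negative element str(i) contains '-' and A raises ValueError at int('-').
def Pre_removeWithRepeating (numList : List Int) : Prop := ∀ n ∈ numList, 0 ≤ n
instance (numList : List Int) : Decidable (Pre_removeWithRepeating numList) := by unfold Pre_removeWithRepeating; infer_instance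

def pvWitness_removeWithRepeating : List Int := [123, 11, 0, 101, 987650, 22]

def Spec_removeWithRepeating (numList : List Int) (out : List Int) : Prop := out = removeWithRepeating_alt numList
instance (numList : List Int) (out : List Int) : Decidable (Spec_removeWithRepeating numList out) := by unfold Spec_removeWithRepeating; infer_instance

-- ===== CLAIM (what is proved, stated in full; the proofs are below) =====
def Claim_equal_removeWithRepeating : Prop := ∀ (numList : List Int), Dom_removeWithRepeating numList → Pre_removeWithRepeating numList → Spec_removeWithRepeating numList (removeWithRepeating numList)

-- ===== LEMMAS AND PROOFS =====

-- digits produced by Nat.toDigitsCore with base 10 are '0'..'9' (given the accumulator already is)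
lemma toDigitsCore_digits (fuel : Nat) : ∀ (n : Nat) (acc : List Char),
    (∀ c ∈ acc, 48 ≤ c.toNat ∧ c.toNat ≤ 57) →
    ∀ c ∈ Nat.toDigitsCore 10 fuel n acc, 48 ≤ c.toNat ∧ c.toNat ≤ 57 := by
  induction fuel with
  | zero => intro n acc hacc c hc; exact hacc c hc
  | succ fuel ih =>
    intro n acc hacc c hc
    have hd : 48 ≤ (Nat.digitChar (n % 10)).toNat ∧ (Nat.digitChar (n % 10)).toNat ≤ 57 := by
      have h10 : n % 10 < 10 := Nat.mod_lt _ (by omega)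
      interval_cases h : n % 10 <;> simp [Nat.digitChar]
    have hacc' : ∀ c' ∈ (Nat.digitChar (n % 10)) :: acc, 48 ≤ c'.toNat ∧ c'.toNat ≤ 57 := by
      intro c' hc'
      rcases List.mem_cons.mp hc' with h | h
      · exact h ▸ hd
      · exact hacc c' h
    rw [Nat.toDigitsCore] at hc
    by_cases h0 : n / 10 = 0
    · simp only [h0] at hc
      exact hacc' c hc
    · simp only [h0] at hc
      exact ih (n / 10) _ hacc' c hc

lemma toChars_digits (n : Int) (h : 0 ≤ n) :
    ∀ c ∈ PySem.Int.toChars n, 48 ≤ c.toNat ∧ c.toNat ≤ 57 := by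
  unfold PySem.Int.toChars
  rw [if_neg (by omega)]
  exact toDigitsCore_digits _ _ [] (by simp)

-- pyGetD on a list of falses always returns false
lemma pyGetD_all_false (xs : List Bool) (hxs : ∀ x ∈ xs, x = false) (i : Int) :
    PySem.List.pyGetD xs i false = false := by
  cases hg : PySem.List.pyGet? xs i with
  | none => simp [PySem.List.pyGetD, hg]
  | some b =>
    have := PySem.List.mem_of_pyGet?_eq_some xs hg
    simp [PySem.List.pyGetD, hg, hxs b this]

-- the A-inner loop computes "distinct digits and none already seen"
lemma pvAInner_iff (cs : List Char) : ∀ (temp : List Bool), temp.length = 11 →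
    (∀ c ∈ cs, 48 ≤ c.toNat ∧ c.toNat ≤ 57) →
    (pvAInner cs temp = true ↔
      (cs.map pvDigit).Nodup ∧ ∀ c ∈ cs, PySem.List.pyGetD temp (pvDigit c) false = false) := by
  induction cs with
  | nil => intro temp _ _; simp [pvAInner]
  | cons c cs ih =>
    intro temp hlen hcs
    have hc := hcs c (List.mem_cons_self ..)
    have hd : 0 ≤ pvDigit c ∧ pvDigit c < 11 := by unfold pvDigit; omega
    have hdn : pvDigit c = ((pvDigit c).toNat : Int) := by omega
    have hdlt : (pvDigit c).toNat < temp.length := by omega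
    by_cases hseen : PySem.List.pyGetD temp (pvDigit c) false = true
    · simp only [pvAInner, if_pos hseen]
      constructor
      · intro h; exact absurd h (by simp)
      · rintro ⟨_, hall⟩
        have := hall c (List.mem_cons_self ..)
        rw [this] at hseen; exact absurd hseen (by simp)
    · have hseen' : PySem.List.pyGetD temp (pvDigit c) false = false := by
        simpa using hseen
      simp only [pvAInner, if_neg hseen]
      have hset : PySem.List.pySetD temp (pvDigit c) true = temp.set (pvDigit c).toNat true :=
        PySem.List.pySetD_of_nonneg temp true hd.1
      have hlen' : (PySem.List.pySetD temp (pvDigit c) true).length = 11 := by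
        rw [hset]; simp [hlen]
      rw [ih _ hlen' (fun c' hc' => hcs c' (List.mem_cons_of_mem _ hc'))]
      have hget : ∀ c' : Char, 48 ≤ c'.toNat → c'.toNat ≤ 57 →
          PySem.List.pyGetD (PySem.List.pySetD temp (pvDigit c) true) (pvDigit c') false =
            if pvDigit c' = pvDigit c then true else PySem.List.pyGetD temp (pvDigit c') false := by
        intro c' h1 h2
        have hd' : 0 ≤ pvDigit c' ∧ pvDigit c' < 11 := by unfold pvDigit; omega
        have hdn' : pvDigit c' = ((pvDigit c').toNat : Int) := by omega
        by_cases heq : pvDigit c' = pvDigit c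
        · rw [if_pos heq, heq, hdn]
          rw [PySem.List.pyGetD_pySetD_natCast temp _ _ true false (by omega)]
          rw [if_pos rfl]
        · rw [if_neg heq, hdn, hdn']
          rw [PySem.List.pyGetD_pySetD_natCast temp _ _ true false (by omega)]
          rw [if_neg (by omega)]
      constructor
      · rintro ⟨hnd, hall⟩
        refine ⟨?_, ?_⟩
        · rw [List.map_cons, List.nodup_cons]
          refine ⟨?_, hnd⟩
          intro hmem
          rcases List.mem_map.mp hmem with ⟨c', hc', heq⟩
          have := hall c' hc'
          rw [hget c' (hcs c' (List.mem_cons_of_mem _ hc')).1 (hcs c' (List.mem_cons_of_mem _ hc')).2] at this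
          rw [if_pos heq] at this
          exact absurd this (by simp)
        · intro c' hc'
          rcases List.mem_cons.mp hc' with h | h
          · exact h ▸ hseen'
          · have := hall c' h
            rw [hget c' (hcs c' (List.mem_cons_of_mem _ h)).1 (hcs c' (List.mem_cons_of_mem _ h)).2] at this
            by_cases heq : pvDigit c' = pvDigit c
            · rw [if_pos heq] at this; exact absurd this (by simp)
            · rw [if_neg heq] at this; exact this
      · rintro ⟨hnd, hall⟩
        rw [List.map_cons, List.nodup_cons] at hnd
        refine ⟨hnd.2, ?_⟩
        intro c' hc'
        rw [hget c' (hcs c' (List.mem_cons_of_mem _ hc')).1 (hcs c' (List.mem_cons_of_mem _ hc')).2]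
        have hne : pvDigit c' ≠ pvDigit c := by
          intro heq
          exact hnd.1 (List.mem_map.mpr ⟨c', hc', heq⟩)
        rw [if_neg hne]
        exact hall c' (List.mem_cons_of_mem _ hc')

-- pvDigit is injective, so distinctness of the digit values is distinctness of the characters
lemma pvDigit_injective : Function.Injective pvDigit := by
  intro a b h
  unfold pvDigit at h
  simp only [sub_left_inj, Nat.cast_inj] at h
  unfold Char.toNat at h
  exact Char.ext (UInt32.toNat_inj.mp h)

-- the zip-with-tail all-distinct test is the adjacent-chain of ≠
lemma zip_all_ne_iff_isChain (s : List Char) :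
    ((s.zip (s.drop 1)).all (fun p => p.1 != p.2)) = true ↔ s.IsChain (· ≠ ·) := by
  induction s with
  | nil => simp
  | cons a s ih =>
    cases s with
    | nil => simp
    | cons b t => simp_all [List.isChain_cons_cons]

-- on a ≤-sorted list, adjacent ≠ forces strict pairwise increase
lemma pairwise_lt_of_isChain_ne : ∀ (s : List Char), s.Pairwise (· ≤ ·) → s.IsChain (· ≠ ·) →
    s.Pairwise (· < ·) := by
  intro s
  induction s with
  | nil => intro _ _; simp
  | cons a s ih =>
    intro hp hc
    rw [List.pairwise_cons] at hp ⊢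
    cases s with
    | nil => simp
    | cons b t =>
      rw [List.isChain_cons_cons] at hc
      have hbt := ih hp.2 hc.2
      have hab : a < b := lt_of_le_of_ne (hp.1 b (List.mem_cons_self ..)) hc.1
      refine ⟨?_, hbt⟩
      intro x hx
      rcases List.mem_cons.mp hx with h | h
      · exact h ▸ hab
      · exact lt_trans hab ((List.pairwise_cons.mp hbt).1 x h)

-- on a ≤-sorted list, nodup is exactly the adjacent-≠ chain
lemma nodup_iff_isChain_ne (s : List Char) (hp : s.Pairwise (· ≤ ·)) :
    s.Nodup ↔ s.IsChain (· ≠ ·) := by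
  constructor
  · intro h
    exact List.Pairwise.isChain
      ((List.pairwise_and_iff.mpr ⟨hp, h⟩).imp (fun ⟨h1, h2⟩ => lt_of_le_of_ne h1 h2)) |>.imp
      (@fun _ _ hx => ne_of_lt hx)
  · intro h
    exact ((pairwise_lt_of_isChain_ne s hp h).imp (@fun _ _ hx => ne_of_lt hx))

-- B's test decides distinctness of the digit characters
lemma pvBTest_iff (i : Int) : pvBTest i = true ↔ (PySem.Int.toChars i).Nodup := by
  unfold pvBTest
  have hslice : PySem.List.slice (PySem.List.sorted (PySem.Int.toChars i) (fun c => c) false) (some 1) none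
      = (PySem.List.sorted (PySem.Int.toChars i) (fun c => c) false).drop 1 := by
    simpa using PySem.List.slice_from_natCast (PySem.List.sorted (PySem.Int.toChars i) (fun c => c) false) 1
  show ((PySem.List.sorted (PySem.Int.toChars i) (fun c => c) false).zip
      (PySem.List.slice (PySem.List.sorted (PySem.Int.toChars i) (fun c => c) false) (some 1) none)).all
      (fun p => p.1 != p.2) = true ↔ (PySem.Int.toChars i).Nodup
  rw [hslice, zip_all_ne_iff_isChain]
  rw [← nodup_iff_isChain_ne _ (PySem.List.sorted_pairwise (PySem.Int.toChars i) (fun c => c))]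
  exact (PySem.List.sorted_perm (PySem.Int.toChars i) (fun c => c) false).nodup_iff

-- per-element agreement of the two tests on nonnegative numbers
lemma tests_agree (i : Int) (h : 0 ≤ i) :
    pvAInner (PySem.Int.toChars i) ((PySem.List.pyRange 0 11 1).map (fun _ => false)) =
      pvBTest i := by
  have hlen : ((PySem.List.pyRange 0 11 1).map (fun _ => false)).length = 11 := by decide
  have hcs := toChars_digits i h
  have hfalse : ∀ x ∈ (PySem.List.pyRange 0 11 1).map (fun _ => false), x = false := by decide
  cases hb : pvBTest i
  · cases ha : pvAInner (PySem.Int.toChars i) ((PySem.List.pyRange 0 11 1).map (fun _ => false))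
    · rfl
    · exfalso
      have hnd := ((pvAInner_iff _ _ hlen hcs).mp ha).1
      have : pvBTest i = true :=
        (pvBTest_iff i).mpr ((List.nodup_map_iff pvDigit_injective).mp hnd)
      rw [hb] at this; exact absurd this (by simp)
  · have hnd := (pvBTest_iff i).mp hb
    exact (pvAInner_iff _ _ hlen hcs).mpr
      ⟨(List.nodup_map_iff pvDigit_injective).mpr hnd, fun c _ => pyGetD_all_false _ hfalse _⟩

-- ===== VERDICT (by name: the statement is the Claim_ definition above) =====
theorem removeWithRepeating_spec : Claim_equal_removeWithRepeating := by
  intro numList _ hpre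
  unfold Spec_removeWithRepeating removeWithRepeating removeWithRepeating_alt
  rw [PySem.List.foldl_append_if_eq_filter, PySem.List.foldl_append_if_eq_filter]
  rw [List.nil_append, List.nil_append]
  exact List.filter_congr (fun i hi => tests_agree i (hpre i hi))
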